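-- pv_equiv track=rewrite | github.com/xiaol/Autoresearch_ideas | experiments/estimate_generic_triple_compute.py | topk_mix_flops
-- ===== SOURCE A (Python) =====
-- def topk_mix_flops(seq_len: int, topk: int, width: int) -> int:
--     total = 0
--     for token_index in range(seq_len):
--         memory_size = token_index
--         if memory_size == 0:
--             continue
--         total += 2 * min(topk, memory_size) * width
--     return total
-- ===== SOURCE B (Python) =====
-- def topk_mix_flops(seq_len: int, topk: int, width: int) -> int:
--     # Closed-form: sum over i=1..n of min(topk, i), with n = seq_len - 1,
--     # split at k = clamp(topk, 0, n): triangle part + constant part.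
--     n = seq_len - 1
--     if n <= 0:
--         return 0
--     k = min(max(topk, 0), n)
--     return 2 * width * (k * (k + 1) // 2 + (n - k) * topk)
-- ===== Notes on version B (the rewrite author's own statement) =====
-- stated objective: faster
-- what changed: Replaced the O(seq_len) per-token loop with a closed-form arithmetic-series formula split at the clamp point k = min(max(topk,0), seq_len-1).
import Mathlib
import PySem

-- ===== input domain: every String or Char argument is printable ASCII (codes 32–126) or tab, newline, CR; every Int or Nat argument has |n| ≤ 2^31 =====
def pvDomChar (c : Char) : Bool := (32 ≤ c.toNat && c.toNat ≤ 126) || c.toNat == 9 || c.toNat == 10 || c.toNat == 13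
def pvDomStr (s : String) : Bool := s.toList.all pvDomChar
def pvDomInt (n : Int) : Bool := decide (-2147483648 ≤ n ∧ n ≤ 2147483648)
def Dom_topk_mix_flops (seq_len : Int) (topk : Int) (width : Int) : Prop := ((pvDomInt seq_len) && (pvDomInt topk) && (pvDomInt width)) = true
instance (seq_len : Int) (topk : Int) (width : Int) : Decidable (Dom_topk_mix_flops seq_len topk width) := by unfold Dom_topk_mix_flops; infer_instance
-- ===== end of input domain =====

-- B replaces A's O(seq_len) loop by a closed-form arithmetic-series formula split at the clamp point (objective: faster, asymptotic).

-- ===== PORT A =====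
def topk_mix_flops (seq_len : Int) (topk : Int) (width : Int) : Int :=
  (PySem.List.pyRange 0 seq_len 1).foldl
    (fun total token_index =>
      let memory_size := token_index
      if memory_size = 0 then total
      else total + 2 * min topk memory_size * width) 0

-- ===== PORT B =====
def topk_mix_flops_alt (seq_len : Int) (topk : Int) (width : Int) : Int :=
  let n := seq_len - 1
  if n ≤ 0 then 0
  else
    let k := min (max topk 0) n
    2 * width * (PySem.Int.floordiv (k * (k + 1)) 2 + (n - k) * topk)

-- ===== PRECONDITION & SPEC =====
def Spec_topk_mix_flops (seq_len : Int) (topk : Int) (width : Int) (out : Int) : Prop := out = topk_mix_flops_alt seq_len topk width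
instance (seq_len : Int) (topk : Int) (width : Int) (out : Int) : Decidable (Spec_topk_mix_flops seq_len topk width out) := by unfold Spec_topk_mix_flops; infer_instance

-- ===== CLAIM (what is proved, stated in full; the proofs are below) =====
def Claim_equal_topk_mix_flops : Prop := ∀ (seq_len : Int) (topk : Int) (width : Int), Dom_topk_mix_flops seq_len topk width → Spec_topk_mix_flops seq_len topk width (topk_mix_flops seq_len topk width)

-- ===== LEMMAS AND PROOFS =====

-- the exact running sum of min(t, i) for i = 1 .. n
def pvG (t : Int) : Nat → Int
  | 0 => 0
  | n+1 => pvG t n + min t ((n : Int) + 1)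

lemma pvA_nat (t w : Int) : ∀ n : Nat, topk_mix_flops (n : Int) t w = 2 * w * pvG t (n - 1) := by
  intro n
  induction n with
  | zero => simp [topk_mix_flops, PySem.List.pyRange_one_eq_nil (by omega : (0:Int) ≤ 0), pvG]
  | succ m ih =>
    unfold topk_mix_flops at ih ⊢
    rw [show ((m + 1 : Nat) : Int) = (m : Int) + 1 by push_cast; ring,
        PySem.List.pyRange_one_succ_right (by positivity), List.foldl_append]
    simp only [List.foldl]
    cases m with
    | zero => simp [pvG]
    | succ p =>
      have h0 : ¬ (((p + 1 : Nat) : Int) = 0) := by push_cast; omega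
      push_cast at h0 ih ⊢
      simp only [h0, if_false, ih]
      simp only [pvG]
      ring

lemma pvG2 (t : Int) : ∀ n : Nat, 2 * pvG t n =
    (min (max t 0) (n : Int)) * ((min (max t 0) (n : Int)) + 1)
      + 2 * ((n : Int) - min (max t 0) (n : Int)) * t := by
  intro n
  induction n with
  | zero =>
    have hk : min (max t 0) ((0 : Nat) : Int) = 0 := by
      simp only [Int.min_def, Int.max_def]; split_ifs <;> omega
    rw [hk]; simp [pvG]
  | succ m ih =>
    by_cases h : t ≤ (m : Int)
    · have hk : min (max t 0) (((m + 1 : Nat)) : Int) = min (max t 0) ((m : Nat) : Int) := by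
        push_cast
        simp only [Int.min_def, Int.max_def]; split_ifs <;> omega
      have hmin : min t ((m : Int) + 1) = t := by
        simp only [Int.min_def]; split_ifs <;> omega
      simp only [pvG, hk, hmin]
      push_cast
      push_cast at ih
      linarith [ih]
    · have hk : min (max t 0) (((m + 1 : Nat)) : Int) = (m : Int) + 1 := by push_cast; omega
      have hk' : min (max t 0) ((m : Nat) : Int) = (m : Int) := by omega
      have hmin : min t ((m : Int) + 1) = (m : Int) + 1 := by omega
      simp only [pvG, hmin]
      rw [hk]
      rw [hk'] at ih
      push_cast at ih ⊢
      linarith [ih]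

lemma pvG_closed (t : Int) (n : Nat) :
    pvG t n = PySem.Int.floordiv ((min (max t 0) (n : Int)) * ((min (max t 0) (n : Int)) + 1)) 2
      + ((n : Int) - min (max t 0) (n : Int)) * t := by
  have h2 := pvG2 t n
  set k : Int := min (max t 0) (n : Int) with hkdef
  have hkk : k * (k + 1) = 2 * (pvG t n - ((n : Int) - k) * t) := by linarith
  rw [PySem.Int.floordiv_eq_ediv_of_pos (by omega), hkk,
      Int.mul_ediv_cancel_left _ (by omega : (2:Int) ≠ 0)]
  ring

-- ===== VERDICT (by name: the statement is the Claim_ definition above) =====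
theorem topk_mix_flops_spec : Claim_equal_topk_mix_flops := by
  intro s t w _
  unfold Spec_topk_mix_flops
  by_cases hs : s ≤ 1
  · have hA : topk_mix_flops s t w = 0 := by
      by_cases h0 : s ≤ 0
      · simp [topk_mix_flops, PySem.List.pyRange_one_eq_nil h0]
      · have hs1 : s = 1 := by omega
        subst hs1
        have := pvA_nat t w 1
        simpa [pvG] using this
    rw [hA]
    simp only [topk_mix_flops_alt]
    rw [if_pos (by omega)]
  · have hs1 : 1 < s := by omega
    obtain ⟨n, hn⟩ : ∃ n : Nat, s = (n : Int) + 1 := ⟨(s - 1).toNat, by omega⟩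
    have hpos : 0 < (n : Int) := by omega
    subst hn
    have hA : topk_mix_flops ((n : Int) + 1) t w = 2 * w * pvG t n := by
      have := pvA_nat t w (n + 1)
      simpa using this
    rw [hA, pvG_closed]
    simp only [topk_mix_flops_alt]
    rw [if_neg (by omega)]
    ring_nf
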